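-- pv_equiv track=rewrite | github.com/MrBrantCode/unitest_baseline | mut_generate/mist_train_cf/cf_21912/solution.py | unique_words_in_alphabetical_order
-- ===== SOURCE A (Python) =====
-- def unique_words_in_alphabetical_order(string):
--     # Convert the string to lowercase
--     string = string.lower()
--
--     # Create a list to store the unique words
--     unique_words = []
--
--     # Iterate through each character in the string
--     i = 0
--     while i < len(string):
--         # Find the start and end indices of each word
--         if string[i].isalpha():
--             start = i
--             while i < len(string) and string[i].isalpha():
--                 i += 1
--             end = i
--
--             # Extract the word from the string
--             word = string[start:end]
--
--             # Remove any leading or trailing whitespace characters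
--             word = word.strip()
--
--             # Check if the word is not already in the unique_words list
--             if word not in unique_words:
--                 # Add the word to the unique_words list
--                 unique_words.append(word)
--
--         i += 1
--
--     # Sort the unique_words list in alphabetical order using bubble sort
--     for i in range(len(unique_words)):
--         for j in range(len(unique_words) - 1):
--             if unique_words[j] > unique_words[j + 1]:
--                 unique_words[j], unique_words[j + 1] = unique_words[j + 1], unique_words[j]
--
--     return unique_words
-- ===== SOURCE B (Python) =====
-- def unique_words_in_alphabetical_order(string):
--     # Single pass with a run accumulator; dedup via a set; sorted() at the end.
--     words = set()
--     current = []
--     for ch in string.lower():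
--         if ch.isalpha():
--             current.append(ch)
--         elif current:
--             words.add(''.join(current))
--             current = []
--     if current:
--         words.add(''.join(current))
--     return sorted(words)
-- ===== Notes on version B (the rewrite author's own statement) =====
-- stated objective: simpler
-- what changed: Replaced A's manual index state machine, O(k^2) list-membership dedup and full bubble sort by one accumulator pass that collects alphabetic runs into a set, then sorted().
import Mathlib
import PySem

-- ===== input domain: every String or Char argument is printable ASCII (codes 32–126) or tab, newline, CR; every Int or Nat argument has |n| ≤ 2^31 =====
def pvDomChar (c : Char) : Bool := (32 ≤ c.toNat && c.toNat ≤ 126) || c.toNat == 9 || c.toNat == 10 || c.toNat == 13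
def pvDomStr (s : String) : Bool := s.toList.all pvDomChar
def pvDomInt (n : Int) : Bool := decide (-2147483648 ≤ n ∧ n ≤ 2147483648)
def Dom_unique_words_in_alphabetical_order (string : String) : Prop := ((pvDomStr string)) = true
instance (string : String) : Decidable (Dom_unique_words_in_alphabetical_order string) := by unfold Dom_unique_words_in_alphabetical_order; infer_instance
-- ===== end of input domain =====

-- B replaces A's index state machine + list membership + bubble sort by a single
-- accumulator pass collecting alphabetic runs into a set, then sorted() (objective: simpler).

-- ===== PORT A =====
-- the while-loop over index i, as structural recursion on the remaining characters;
-- an alphabetic run is extracted as string[start:end] = takeWhile, the loop resumes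
-- after it (inner while then 'i += 1' = dropWhile then drop 1)
def pvScanA : List Char → List String → List String
  | [], acc => acc
  | c :: rest, acc =>
    if PySem.Chars.isalpha c then
      let word := PySem.Chars.strip ((c :: rest).takeWhile PySem.Chars.isalpha)
      let acc' := if String.ofList word ∈ acc then acc else acc ++ [String.ofList word]
      pvScanA (((c :: rest).dropWhile PySem.Chars.isalpha).drop 1) acc'
    else
      pvScanA rest acc
termination_by cs _ => cs.length
decreasing_by
  · have h := List.length_dropWhile_le (p := PySem.Chars.isalpha) (l := c :: rest)
    have h2 : ((c :: rest).dropWhile PySem.Chars.isalpha) = rest.dropWhile PySem.Chars.isalpha := by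
      simp [List.dropWhile, *]
    have h3 := List.length_dropWhile_le (p := PySem.Chars.isalpha) (l := rest)
    simp [h2]; omega
  · simp

-- one bubble pass: 'for j in range(len-1): swap adjacent if out of order'
def pvBubblePass : List String → List String
  | x :: y :: rest => if y < x then y :: pvBubblePass (x :: rest) else x :: pvBubblePass (y :: rest)
  | xs => xs

-- 'for i in range(len(unique_words)):' — one pass per outer iteration
def pvBubble : Nat → List String → List String
  | 0, xs => xs
  | n + 1, xs => pvBubble n (pvBubblePass xs)

def unique_words_in_alphabetical_order (string : String) : List String :=
  let uw := pvScanA (PySem.Str.lower string).toList []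
  pvBubble uw.length uw

-- ===== PORT B =====
-- the loop body: append alphabetic chars to the current run, flush a finished run into the set
def pvStepB (st : List Char × PySem.Set String) (ch : Char) : List Char × PySem.Set String :=
  if PySem.Chars.isalpha ch then (st.1 ++ [ch], st.2)
  else if st.1 ≠ [] then ([], PySem.Set.add st.2 (String.ofList st.1))
  else st

def unique_words_in_alphabetical_order_alt (string : String) : List String :=
  let st := (PySem.Str.lower string).toList.foldl pvStepB ([], PySem.Set.empty)
  let words := if st.1 ≠ [] then PySem.Set.add st.2 (String.ofList st.1) else st.2
  PySem.List.sorted words (fun x => x)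

-- ===== PRECONDITION & SPEC =====
def Spec_unique_words_in_alphabetical_order (string : String) (out : List String) : Prop := out = unique_words_in_alphabetical_order_alt string
instance (string : String) (out : List String) : Decidable (Spec_unique_words_in_alphabetical_order string out) := by unfold Spec_unique_words_in_alphabetical_order; infer_instance

-- ===== CLAIM (what is proved, stated in full; the proofs are below) =====
def Claim_equal_unique_words_in_alphabetical_order : Prop := ∀ (string : String), Dom_unique_words_in_alphabetical_order string → Spec_unique_words_in_alphabetical_order string (unique_words_in_alphabetical_order string)

-- ===== LEMMAS AND PROOFS =====

-- the sequence of maximal alphabetic runs of a character list (specification function)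
def pvRuns : List Char → List String
  | [] => []
  | c :: rest =>
    if PySem.Chars.isalpha c then
      String.ofList ((c :: rest).takeWhile PySem.Chars.isalpha) :: pvRuns ((c :: rest).dropWhile PySem.Chars.isalpha)
    else pvRuns rest
termination_by cs => cs.length
decreasing_by
  · have h2 : ((c :: rest).dropWhile PySem.Chars.isalpha) = rest.dropWhile PySem.Chars.isalpha := by
      simp [List.dropWhile, *]
    have h3 := List.length_dropWhile_le (p := PySem.Chars.isalpha) (l := rest)
    simp [h2]; omega
  · simp

theorem pv_alpha_not_space (c : Char) (h : PySem.Chars.isalpha c = true) :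
    PySem.Chars.isspace c = false := by
  simp only [PySem.Chars.isalpha, PySem.Chars.isupper, PySem.Chars.islower, Char.le_def,
    Bool.or_eq_true, Bool.and_eq_true, decide_eq_true_eq, UInt32.le_iff_toNat_le] at h
  simp only [PySem.Chars.isspace, Bool.or_eq_false_iff, Bool.and_eq_false_iff,
    decide_eq_false_iff_not]
  have hn : c.toNat = c.val.toNat := rfl
  have e1 : ('A' : Char).val.toNat = 65 := rfl
  have e2 : ('Z' : Char).val.toNat = 90 := rfl
  have e3 : ('a' : Char).val.toNat = 97 := rfl
  have e4 : ('z' : Char).val.toNat = 122 := rfl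
  rcases h with ⟨h1, h2⟩ | ⟨h1, h2⟩ <;> (rw [hn]; omega)

theorem pv_strip_alpha (w : List Char) (h : ∀ c ∈ w, PySem.Chars.isalpha c = true) :
    PySem.Chars.strip w = w := by
  have hs : ∀ c ∈ w, ¬ PySem.Chars.isspace c = true := by
    intro c hc
    simp [pv_alpha_not_space c (h c hc)]
  have h1 : PySem.Chars.lstrip w = w := by
    simp only [PySem.Chars.lstrip, List.dropWhile_eq_self_iff]
    intro hx
    simpa using hs _ (List.getElem_mem hx)
  have h2 : PySem.Chars.rstrip w = w := by
    simp only [PySem.Chars.rstrip]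
    rw [List.dropWhile_eq_self_iff.mpr, List.reverse_reverse]
    intro hx
    have hxw : w.reverse[0] ∈ w := by
      have := List.getElem_mem hx
      simpa using this
    simpa using hs _ hxw
  simp [PySem.Chars.strip, h1, h2]

theorem pv_dropWhile_head_false {α : Type} (p : α → Bool) (l : List α) (e : α) (es : List α)
    (h : l.dropWhile p = e :: es) : p e = false := by
  induction l with
  | nil => simp at h
  | cons x xs ih =>
    rw [List.dropWhile_cons] at h
    split at h
    · exact ih h
    · cases h; simp_all

theorem pv_runs_skip_nonalpha (l : List Char) :
    pvRuns ((l.dropWhile PySem.Chars.isalpha).drop 1) = pvRuns (l.dropWhile PySem.Chars.isalpha) := by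
  rcases hd : l.dropWhile PySem.Chars.isalpha with _ | ⟨e, es⟩
  · simp
  · have he := pv_dropWhile_head_false _ _ _ _ hd
    rw [List.drop_one, List.tail_cons, pvRuns, he]
    simp

theorem pv_add_eq (s : List String) (w : String) :
    (if w ∈ s then s else s ++ [w]) = PySem.Set.add s w := by
  simp [PySem.Set.add, PySem.Set.contains]

theorem pv_scanA_eq (cs : List Char) (acc : List String) :
    pvScanA cs acc = PySem.Set.update acc (pvRuns cs) := by
  fun_induction pvScanA cs acc with
  | case1 acc => rw [pvRuns, PySem.Set.update_nil]
  | case2 c rest acc h word acc' ih =>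
    have hw : word = (c :: rest).takeWhile PySem.Chars.isalpha :=
      pv_strip_alpha _ (fun x hx => List.mem_takeWhile_imp hx)
    have ha : acc' = PySem.Set.add acc (String.ofList word) := pv_add_eq acc _
    rw [ih, pvRuns, if_pos h, pv_runs_skip_nonalpha, ha, hw, PySem.Set.update_cons]
  | case3 c rest acc h ih => rw [ih, pvRuns, if_neg h]

theorem pv_takeWhile_append (l1 : List Char) (c : Char) (t : List Char)
    (h1 : ∀ a ∈ l1, PySem.Chars.isalpha a = true) (hc : PySem.Chars.isalpha c = false) :
    (l1 ++ c :: t).takeWhile PySem.Chars.isalpha = l1 ∧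
    (l1 ++ c :: t).dropWhile PySem.Chars.isalpha = c :: t := by
  induction l1 with
  | nil => simp [List.takeWhile_cons, List.dropWhile_cons, hc]
  | cons a l ih =>
    have ha := h1 a (by simp)
    have := ih (fun x hx => h1 x (by simp [hx]))
    simp [List.takeWhile_cons, List.dropWhile_cons, ha, this]

theorem pv_foldB_eq (cs : List Char) (cur : List Char) (s : PySem.Set String)
    (hcur : ∀ c ∈ cur, PySem.Chars.isalpha c = true) :
    (let st := cs.foldl pvStepB (cur, s)
     if st.1 ≠ [] then PySem.Set.add st.2 (String.ofList st.1) else st.2)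
      = PySem.Set.update s (pvRuns (cur ++ cs)) := by
  induction cs generalizing cur s with
  | nil =>
    show (if cur ≠ [] then PySem.Set.add s (String.ofList cur) else s) = _
    cases cur with
    | nil => simp [pvRuns, PySem.Set.update_nil]
    | cons d ds =>
      have hd := hcur d (by simp)
      have ht : (d :: ds).takeWhile PySem.Chars.isalpha = d :: ds :=
        List.takeWhile_eq_self_iff.mpr hcur
      have hdr : (d :: ds).dropWhile PySem.Chars.isalpha = [] :=
        List.dropWhile_eq_nil_iff.mpr (fun x hx => hcur x hx)
      simp only [List.append_nil, pvRuns, if_pos hd, ht, hdr]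
      rw [PySem.Set.update_cons, PySem.Set.update_nil]
      simp
  | cons c rest ih =>
    show (let st := rest.foldl pvStepB (pvStepB (cur, s) c)
          if st.1 ≠ [] then PySem.Set.add st.2 (String.ofList st.1) else st.2) = _
    by_cases hα : PySem.Chars.isalpha c = true
    · have hstep : pvStepB (cur, s) c = (cur ++ [c], s) := by simp [pvStepB, hα]
      rw [hstep]
      have := ih (cur ++ [c]) s (by
        intro x hx
        rcases List.mem_append.mp hx with hx | hx
        · exact hcur x hx
        · simp at hx; subst hx; exact hα)
      simpa [List.append_assoc] using this
    · have hcf : PySem.Chars.isalpha c = false := by simpa using hα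
      cases cur with
      | nil =>
        have hstep : pvStepB ([], s) c = ([], s) := by simp [pvStepB, hcf]
        rw [hstep, ih [] s (by simp)]
        have hr : pvRuns (c :: rest) = pvRuns rest := by
          rw [pvRuns.eq_def]; simp [hcf]
        simp only [List.nil_append, hr]
      | cons d ds =>
        have hstep : pvStepB (d :: ds, s) c = ([], PySem.Set.add s (String.ofList (d :: ds))) := by
          simp [pvStepB, hcf]
        rw [hstep, ih [] _ (by simp)]
        have hd := hcur d (by simp)
        obtain ⟨htw, hdw⟩ := pv_takeWhile_append (d :: ds) c rest hcur hcf
        have hr2 : pvRuns (c :: rest) = pvRuns rest := by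
          rw [pvRuns.eq_def]; simp [hcf]
        have hr : pvRuns ((d :: ds) ++ c :: rest)
            = String.ofList (d :: ds) :: pvRuns rest := by
          rw [pvRuns.eq_def]
          simp only [List.cons_append]
          rw [if_pos (by simpa using hd)]
          rw [← List.cons_append, htw, hdw, hr2]
        rw [hr, PySem.Set.update_cons]
        simp

theorem pv_pass_perm (xs : List String) : (pvBubblePass xs).Perm xs := by
  fun_induction pvBubblePass xs with
  | case1 x y rest h ih => exact (ih.cons y).trans (List.Perm.swap x y rest)
  | case2 x y rest h ih => exact ih.cons x
  | case3 xs h => exact List.Perm.refl xs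

theorem pv_bubble_perm (n : Nat) (xs : List String) : (pvBubble n xs).Perm xs := by
  induction n generalizing xs with
  | zero => exact List.Perm.refl xs
  | succ n ih => exact (ih (pvBubblePass xs)).trans (pv_pass_perm xs)

theorem pv_pass_max (x : String) (xs : List String) :
    ∃ ys m, pvBubblePass (x :: xs) = ys ++ [m] ∧ (∀ a ∈ ys, a ≤ m) ∧ ys.length = xs.length := by
  induction xs generalizing x with
  | nil => exact ⟨[], x, by simp [pvBubblePass], by simp, rfl⟩
  | cons y t ih =>
    by_cases hxy : y < x
    · obtain ⟨ys, m, he, hle, hlen⟩ := ih x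
      refine ⟨y :: ys, m, ?_, ?_, ?_⟩
      · rw [pvBubblePass, if_pos hxy, he]; rfl
      · intro a ha
        rcases List.mem_cons.mp ha with rfl | ha
        · have hx : x ∈ ys ++ [m] := by
            rw [← he]; exact (pv_pass_perm _).symm.subset (by simp)
          rcases List.mem_append.mp hx with hx | hx
          · exact le_of_lt (lt_of_lt_of_le hxy (hle _ hx))
          · simp at hx; subst hx; exact le_of_lt hxy
        · exact hle _ ha
      · simp [hlen]
    · obtain ⟨ys, m, he, hle, hlen⟩ := ih y
      refine ⟨x :: ys, m, ?_, ?_, ?_⟩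
      · rw [pvBubblePass, if_neg hxy, he]; rfl
      · intro a ha
        rcases List.mem_cons.mp ha with rfl | ha
        · have hy : y ∈ ys ++ [m] := by
            rw [← he]; exact (pv_pass_perm _).symm.subset (by simp)
          have hxle : a ≤ y := le_of_not_gt hxy
          rcases List.mem_append.mp hy with hy | hy
          · exact hxle.trans (hle _ hy)
          · simp at hy; subst hy; exact hxle
        · exact hle _ ha
      · simp [hlen]

theorem pv_pass_snoc (n : Nat) (ys : List String) (m : String) (hn : ys.length ≤ n)
    (h : ∀ a ∈ ys, a ≤ m) : pvBubblePass (ys ++ [m]) = pvBubblePass ys ++ [m] := by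
  induction n generalizing ys with
  | zero =>
    have : ys = [] := List.eq_nil_of_length_eq_zero (Nat.le_zero.mp hn)
    subst this; simp [pvBubblePass]
  | succ n ih =>
    match ys with
    | [] => simp [pvBubblePass]
    | [y] =>
      have := h y (by simp)
      simp only [List.cons_append, List.nil_append]
      rw [pvBubblePass, if_neg (by exact not_lt_of_ge this)]
      simp [pvBubblePass]
    | y :: z :: t =>
      have hlen : (y :: t).length ≤ n ∧ (z :: t).length ≤ n := by
        simp at hn ⊢; omega
      simp only [List.cons_append]
      rw [pvBubblePass]
      by_cases hzy : z < y
      · rw [if_pos hzy]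
        rw [show (y :: (t ++ [m])) = (y :: t) ++ [m] by simp]
        rw [ih (y :: t) hlen.1 (fun a ha => h a (by rcases List.mem_cons.mp ha with rfl | ha <;> simp [ha]))]
        rw [pvBubblePass, if_pos hzy]
        rfl
      · rw [if_neg hzy]
        rw [show (z :: (t ++ [m])) = (z :: t) ++ [m] by simp]
        rw [ih (z :: t) hlen.2 (fun a ha => h a (by rcases List.mem_cons.mp ha with rfl | ha <;> simp [ha]))]
        rw [pvBubblePass, if_neg hzy]
        rfl

theorem pv_bubble_snoc (n : Nat) (ys : List String) (m : String)
    (h : ∀ a ∈ ys, a ≤ m) : pvBubble n (ys ++ [m]) = pvBubble n ys ++ [m] := by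
  induction n generalizing ys with
  | zero => rfl
  | succ n ih =>
    show pvBubble n (pvBubblePass (ys ++ [m])) = pvBubble n (pvBubblePass ys) ++ [m]
    rw [pv_pass_snoc ys.length ys m le_rfl h]
    exact ih (pvBubblePass ys) (fun a ha => h a ((pv_pass_perm ys).subset ha))

theorem pv_bubble_sorted (n : Nat) (xs : List String) (hn : xs.length ≤ n) :
    (pvBubble n xs).Pairwise (· ≤ ·) := by
  induction n generalizing xs with
  | zero =>
    have : xs = [] := List.eq_nil_of_length_eq_zero (Nat.le_zero.mp hn)
    subst this; simp [pvBubble]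
  | succ n ih =>
    match xs with
    | [] =>
      show (pvBubble n (pvBubblePass [])).Pairwise (· ≤ ·)
      rw [show pvBubblePass [] = [] by simp [pvBubblePass]]
      exact ih [] (by simp)
    | x :: t =>
      obtain ⟨ys, m, he, hle, hlen⟩ := pv_pass_max x t
      show (pvBubble n (pvBubblePass (x :: t))).Pairwise (· ≤ ·)
      rw [he, pv_bubble_snoc n ys m hle]
      refine List.pairwise_append.mpr ⟨?_, by simp, ?_⟩
      · exact ih ys (by simp at hn; omega)
      · intro a ha b hb
        simp at hb; subst hb
        exact hle a ((pv_bubble_perm n ys).subset ha)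

theorem pv_main (cs : List Char) :
    pvBubble (pvScanA cs []).length (pvScanA cs []) =
      PySem.List.sorted
        (let st := cs.foldl pvStepB ([], PySem.Set.empty)
         if st.1 ≠ [] then PySem.Set.add st.2 (String.ofList st.1) else st.2)
        (fun x => x) := by
  have hA : pvScanA cs [] = PySem.Set.ofList (pvRuns cs) := by
    rw [pv_scanA_eq, PySem.Set.update_nil_left]
  have hB := pv_foldB_eq cs [] PySem.Set.empty (by simp)
  rw [List.nil_append] at hB
  show pvBubble (pvScanA cs []).length (pvScanA cs []) = PySem.List.sorted _ (fun x => x)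
  rw [hB, hA]
  have hupd : PySem.Set.update PySem.Set.empty (pvRuns cs) = PySem.Set.ofList (pvRuns cs) :=
    PySem.Set.update_nil_left _
  rw [hupd]
  set S := PySem.Set.ofList (pvRuns cs) with hS
  have hperm : (pvBubble S.length S).Perm S := pv_bubble_perm _ _
  have hle : (pvBubble S.length S).Pairwise (· ≤ ·) := pv_bubble_sorted _ _ le_rfl
  have hnd : (pvBubble S.length S).Nodup := hperm.nodup_iff.mpr (PySem.Set.nodup_ofList _)
  have hlt : (pvBubble S.length S).Pairwise (· < ·) := by
    refine (hle.and hnd).imp ?_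
    rintro a b ⟨h1, h2⟩
    exact lt_of_le_of_ne h1 h2
  exact (PySem.List.sorted_eq_of_perm_of_pairwise_lt S (pvBubble S.length S) (fun x => x)
    hperm hlt).symm

-- ===== VERDICT (by name: the statement is the Claim_ definition above) =====
theorem unique_words_in_alphabetical_order_spec : Claim_equal_unique_words_in_alphabetical_order := by
  intro string _
  unfold Spec_unique_words_in_alphabetical_order unique_words_in_alphabetical_order unique_words_in_alphabetical_order_alt
  exact pv_main (PySem.Str.lower string).toList
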